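-- pv_equiv track=rewrite | github.com/TheLilGibby/mud-revelation-vibe | build_navigation_map.py | analyze_location_hierarchy
-- ===== SOURCE A (Python) =====
-- from collections import defaultdict
--
-- def analyze_location_hierarchy(locations):
--     """
--     Analyze location hierarchy (e.g., city -> district -> building)
--     """
--     hierarchy = defaultdict(list)
--
--     for loc in locations:
--         # Check for hierarchical naming
--         if ',' in loc:
--             continue  # Skip multi-location entries
--
--         # Detect sub-locations
--         for other_loc in locations:
--             if other_loc == loc:
--                 continue
--             if loc in other_loc and len(other_loc) > len(loc):
--                 hierarchy[loc].append(other_loc)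
--
--     return dict(hierarchy)
-- ===== SOURCE B (Python) =====
-- def analyze_location_hierarchy(locations):
--     """
--     Analyze location hierarchy (e.g., city -> district -> building)
--     """
--     # Count each distinct comma-free pattern once (first-occurrence order).
--     counts = {}
--     for loc in locations:
--         if ',' not in loc:
--             counts[loc] = counts.get(loc, 0) + 1
--     # One containment scan per DISTINCT pattern; duplicates contribute by
--     # list repetition instead of re-scanning.
--     result = {}
--     for p, c in counts.items():
--         ms = [t for t in locations if len(t) > len(p) and p in t]
--         if ms:
--             result[p] = ms * c
--     return result
-- ===== Notes on version B (the rewrite author's own statement) =====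
-- stated objective: alternative
-- what changed: B replaces A's per-occurrence inner rescans and incremental defaultdict appends by a one-pass counter over distinct comma-free patterns, a single containment filter per distinct pattern, and list repetition (ms * c) for duplicates.
import Mathlib
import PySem

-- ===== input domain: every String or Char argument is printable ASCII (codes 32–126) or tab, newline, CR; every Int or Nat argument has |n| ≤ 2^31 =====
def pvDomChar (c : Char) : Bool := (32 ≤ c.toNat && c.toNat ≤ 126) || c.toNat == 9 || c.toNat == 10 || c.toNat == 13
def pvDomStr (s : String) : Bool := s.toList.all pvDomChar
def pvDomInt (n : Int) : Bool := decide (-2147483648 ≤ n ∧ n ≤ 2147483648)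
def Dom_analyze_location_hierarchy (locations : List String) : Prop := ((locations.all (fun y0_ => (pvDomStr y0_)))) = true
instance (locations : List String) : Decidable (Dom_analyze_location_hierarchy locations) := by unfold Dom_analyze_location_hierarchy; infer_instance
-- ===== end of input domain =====

-- B replaces A's per-occurrence rescans and dict appends by a one-pass counter over the
-- distinct comma-free patterns, one containment filter per distinct pattern, and list
-- repetition for duplicates (objective: alternative decomposition, same worst-case cost).

-- ===== PORT A =====
def analyze_location_hierarchy (locations : List String) : List (String × List String) :=
  -- hierarchy = defaultdict(list); for loc in locations: … ; return dict(hierarchy)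
  (locations.foldl (fun h loc =>
    if PySem.Str.isIn "," loc then h            -- if ',' in loc: continue
    else
      locations.foldl (fun h2 other =>
        if other == loc then h2                 -- if other_loc == loc: continue
        else if PySem.Str.isIn loc other && decide (PySem.Str.len other > PySem.Str.len loc) then
          h2.insert loc (h2.getD loc [] ++ [other])   -- hierarchy[loc].append(other_loc)
        else h2) h) PySem.Dict.empty).items

-- ===== PORT B =====
def analyze_location_hierarchy_alt (locations : List String) : List (String × List String) :=
  -- counts = {}; for loc in locations: if ',' not in loc: counts[loc] = counts.get(loc,0)+1
  let counts := locations.foldl (fun d loc =>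
    if PySem.Str.isIn "," loc then d
    else d.insert loc (d.getD loc 0 + 1)) PySem.Dict.empty
  -- result = {}; for p, c in counts.items(): ms = [t for t in locations if len(t)>len(p) and p in t]; if ms: result[p] = ms * c
  counts.items.foldl (fun res pc =>
    let ms := locations.filter (fun t =>
      decide (PySem.Str.len t > PySem.Str.len pc.1) && PySem.Str.isIn pc.1 t)
    if ms.isEmpty then res
    else res ++ [(pc.1, PySem.List.pyRepeat ms pc.2)]) []

-- ===== PRECONDITION & SPEC =====
def Spec_analyze_location_hierarchy (locations : List String) (out : List (String × List String)) : Prop := out = analyze_location_hierarchy_alt locations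
instance (locations : List String) (out : List (String × List String)) : Decidable (Spec_analyze_location_hierarchy locations out) := by unfold Spec_analyze_location_hierarchy; infer_instance

-- ===== CLAIM (what is proved, stated in full; the proofs are below) =====
def Claim_equal_analyze_location_hierarchy : Prop := ∀ (locations : List String), Dom_analyze_location_hierarchy locations → Spec_analyze_location_hierarchy locations (analyze_location_hierarchy locations)

-- ===== LEMMAS AND PROOFS =====

-- proof-side abbreviations
def pvNoComma (s : String) : Bool := !(PySem.Str.isIn "," s)

def pvQ (p t : String) : Bool := PySem.Str.isIn p t && decide (PySem.Str.len t > PySem.Str.len p)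

def pvMs (locations : List String) (p : String) : List String := locations.filter (pvQ p)

-- the common value of both programs, as a closed expression
def pvSpecItems (locations : List String) (pre : List String) : List (String × List String) :=
  ((PySem.Set.ofList pre).filter (fun k => !(pvMs locations k).isEmpty)).map
    (fun k => (k, PySem.List.pyRepeat (pvMs locations k) ((List.count k pre : Nat) : Int)))

lemma pvQ_self (p : String) : pvQ p p = false := by
  simp [pvQ]

lemma pvRepeat_succ {α : Type} (xs : List α) (n : Nat) :
    PySem.List.pyRepeat xs ((n : Int) + 1) = PySem.List.pyRepeat xs (n : Int) ++ xs := by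
  have h : ((n : Int) + 1).toNat = n + 1 := by omega
  simp [PySem.List.pyRepeat, h, List.replicate_succ']

lemma pvRepeat_one {α : Type} (xs : List α) : PySem.List.pyRepeat xs 1 = xs := by
  simp [PySem.List.pyRepeat]

-- A's inner loop over all locations appends the whole filtered list at once
lemma pvInnerA (locations : List String) (loc : String) (h : PySem.Dict String (List String)) :
    locations.foldl (fun h2 t =>
      if pvQ loc t then h2.insert loc (h2.getD loc [] ++ [t]) else h2) h
    = if (pvMs locations loc).isEmpty then h
      else h.insert loc (h.getD loc [] ++ pvMs locations loc) := by
  induction locations generalizing h with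
  | nil => simp [pvMs]
  | cons t L ih =>
    by_cases hq : pvQ loc t
    · rw [List.foldl_cons, if_pos hq, ih]
      have hms : pvMs (t :: L) loc = t :: pvMs L loc := by simp [pvMs, hq]
      rw [hms]
      by_cases he : (pvMs L loc).isEmpty
      · have : pvMs L loc = [] := by simpa [List.isEmpty_iff] using he
        simp [he, this]
      · simp only [he, if_false, if_neg, PySem.Dict.getD_insert_self,
          PySem.Dict.insert_insert_self, List.append_assoc, List.cons_append, List.nil_append]
        simp
    · rw [List.foldl_cons, if_neg hq, ih]
      have hms : pvMs (t :: L) loc = pvMs L loc := by simp [pvMs, hq]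
      rw [hms]

-- the simplified outer step, folded over the comma-free prefix
def pvFoldA (locations : List String) (pre : List String) : PySem.Dict String (List String) :=
  pre.foldl (fun h loc =>
    if (pvMs locations loc).isEmpty then h
    else h.insert loc (h.getD loc [] ++ pvMs locations loc)) PySem.Dict.empty

lemma pvFoldA_items (locations : List String) (pre : List String) :
    (pvFoldA locations pre).items = pvSpecItems locations pre := by
  induction pre using List.reverseRecOn with
  | nil => simp [pvFoldA, pvSpecItems, PySem.Dict.empty]
  | append_singleton pre loc ih =>
    have hkeys : (pvFoldA locations pre).keys
        = (PySem.Set.ofList pre).filter (fun k => !(pvMs locations k).isEmpty) := by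
      show ((pvFoldA locations pre).items).map Prod.fst = _
      rw [ih]; simp [pvSpecItems, Function.comp_def]
    have hnodup : (pvFoldA locations pre).keys.Nodup := by
      rw [hkeys]; exact (PySem.Set.nodup_ofList pre).filter _
    have hstep : pvFoldA locations (pre ++ [loc])
        = (fun h l => if (pvMs locations l).isEmpty then h
            else h.insert l (h.getD l [] ++ pvMs locations l)) (pvFoldA locations pre) loc := by
      simp [pvFoldA, List.foldl_append]
    by_cases hms : (pvMs locations loc).isEmpty
    · -- loc contributes nothing: the dict is unchanged and loc is filtered out of the spec
      rw [hstep]; simp only [hms, if_true]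
      rw [ih]
      unfold pvSpecItems
      rw [PySem.Set.ofList_append_singleton, PySem.Set.add_eq_ite]
      by_cases hmem : loc ∈ PySem.Set.ofList pre
      · simp only [hmem, if_true]
        apply List.map_congr_left
        intro k hk
        have hkne : k ≠ loc := by
          rintro rfl
          have := List.of_mem_filter hk
          simp [hms] at this
        have hc0 : List.count k [loc] = 0 := List.count_eq_zero.mpr (by simp [hkne])
        simp [List.count_append, hc0]
      · simp only [hmem, if_false]
        rw [List.filter_append]
        have : List.filter (fun k => !(pvMs locations k).isEmpty) [loc] = [] := by
          simp [hms]
        rw [this, List.append_nil]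
        apply List.map_congr_left
        intro k hk
        have hkne : k ≠ loc := by
          rintro rfl
          exact hmem (List.mem_filter.mp hk).1
        have hc0 : List.count k [loc] = 0 := List.count_eq_zero.mpr (by simp [hkne])
        simp [List.count_append, hc0]
    · rw [hstep]; simp only [hms, Bool.false_eq_true, if_false]
      by_cases hmem : loc ∈ PySem.Set.ofList pre
      · -- loc already has an entry: it is overwritten in place with one more repetition
        have hkmem : loc ∈ (pvFoldA locations pre).keys := by
          rw [hkeys]; exact List.mem_filter.mpr ⟨hmem, by simp [hms]⟩
        have hcont : (pvFoldA locations pre).contains loc = true :=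
          (PySem.Dict.contains_iff_mem_keys _ _).mpr hkmem
        have hitem : (loc, PySem.List.pyRepeat (pvMs locations loc) ((List.count loc pre : Nat) : Int))
            ∈ (pvFoldA locations pre).items := by
          rw [ih]
          exact List.mem_map.mpr ⟨loc, List.mem_filter.mpr ⟨hmem, by simp [hms]⟩, rfl⟩
        have hgetD : (pvFoldA locations pre).getD loc []
            = PySem.List.pyRepeat (pvMs locations loc) ((List.count loc pre : Nat) : Int) :=
          PySem.Dict.getD_of_mem_items _ hitem hnodup []
        rw [PySem.Dict.items_insert_of_contains _ _ hcont, hgetD, ih]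
        unfold pvSpecItems
        rw [PySem.Set.ofList_append_singleton, PySem.Set.add_eq_ite]
        simp only [hmem, if_true, List.map_map]
        apply List.map_congr_left
        intro k hk
        by_cases hkl : k = loc
        · subst hkl
          simp only [Function.comp_apply, beq_self_eq_true, if_true]
          rw [← pvRepeat_succ]
          have : ((List.count k (pre ++ [k]) : Nat) : Int)
              = ((List.count k pre : Nat) : Int) + 1 := by
            simp [List.count_append]
          rw [this]
        · have hbne : (k == loc) = false := by simp [hkl]
          simp only [Function.comp_apply, hbne, Bool.false_eq_true, if_false]
          have hc0 : List.count k [loc] = 0 := List.count_eq_zero.mpr (by simp [hkl])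
          simp [List.count_append, hc0]
      · -- fresh key: appended at the end of the dict, count was 0
        have hkne : loc ∉ (pvFoldA locations pre).keys := by
          rw [hkeys]; intro hk; exact hmem (List.mem_filter.mp hk).1
        have hcont : (pvFoldA locations pre).contains loc = false := by
          cases hc : (pvFoldA locations pre).contains loc
          · rfl
          · exact absurd ((PySem.Dict.contains_iff_mem_keys _ _).mp hc) hkne
        have hgetD : (pvFoldA locations pre).getD loc [] = [] :=
          PySem.Dict.getD_of_not_contains _ [] hcont
        rw [PySem.Dict.items_insert_of_not_contains _ _ hcont, hgetD, ih]
        unfold pvSpecItems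
        rw [PySem.Set.ofList_append_singleton,
          PySem.Set.add_of_not_mem (by simpa using hmem), List.filter_append]
        have hfl : List.filter (fun k => !(pvMs locations k).isEmpty) [loc] = [loc] := by
          simp [hms]
        rw [hfl, List.map_append]
        congr 1
        · apply List.map_congr_left
          intro k hk
          have hkl : k ≠ loc := by
            rintro rfl
            exact hmem (List.mem_filter.mp hk).1
          have hc0 : List.count k [loc] = 0 := List.count_eq_zero.mpr (by simp [hkl])
          simp [List.count_append, hc0]
        · have hc0 : List.count loc pre = 0 := by
            rw [List.count_eq_zero]
            intro h; exact hmem ((PySem.Set.mem_ofList _ _).mpr h)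
          simp [List.count_append, hc0, pvRepeat_one]

-- A's whole loop nest computes pvSpecItems over the comma-free entries
lemma pvA_eq (locations : List String) :
    analyze_location_hierarchy locations
      = pvSpecItems locations (locations.filter pvNoComma) := by
  unfold analyze_location_hierarchy
  have h1 : locations.foldl (fun h loc =>
      if PySem.Str.isIn "," loc then h
      else locations.foldl (fun h2 other =>
        if other == loc then h2
        else if PySem.Str.isIn loc other && decide (PySem.Str.len other > PySem.Str.len loc) then
          h2.insert loc (h2.getD loc [] ++ [other])
        else h2) h) PySem.Dict.empty
      = locations.foldl (fun h loc =>
          if pvNoComma loc then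
            (if (pvMs locations loc).isEmpty then h
             else h.insert loc (h.getD loc [] ++ pvMs locations loc))
          else h) PySem.Dict.empty := by
    apply PySem.List.foldl_congr_mem
    intro h loc _
    cases hc : PySem.Str.isIn "," loc
    · have h2 : pvNoComma loc = true := by
        simp only [pvNoComma, Bool.not_eq_true']; exact hc
      simp only [hc, Bool.false_eq_true, if_false, h2, if_true]
      rw [← pvInnerA locations loc h]
      apply PySem.List.foldl_congr_mem
      intro h2 other _
      by_cases heq : other == loc
      · have : other = loc := eq_of_beq heq
        subst this
        simp [pvQ_self]
      · simp [heq, pvQ]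
    · have h2 : pvNoComma loc = false := by
        simp only [pvNoComma, Bool.not_eq_false']; exact hc
      simp only [hc, if_true, h2, Bool.false_eq_true, if_false]
  rw [h1, PySem.List.foldl_if_eq_foldl_filter]
  exact pvFoldA_items locations (locations.filter pvNoComma)

-- B computes the same expression: counter + one filter per distinct pattern + repetition
lemma pvB_eq (locations : List String) :
    analyze_location_hierarchy_alt locations
      = pvSpecItems locations (locations.filter pvNoComma) := by
  unfold analyze_location_hierarchy_alt
  have hcnt : locations.foldl (fun d loc =>
      if PySem.Str.isIn "," loc then d else d.insert loc (d.getD loc 0 + 1))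
        (PySem.Dict.empty : PySem.Dict String Int)
      = PySem.Dict.counter (locations.filter pvNoComma) := by
    have h1 : locations.foldl (fun d loc =>
        if PySem.Str.isIn "," loc then d else d.insert loc (d.getD loc 0 + 1))
          (PySem.Dict.empty : PySem.Dict String Int)
        = locations.foldl (fun d loc =>
            if pvNoComma loc then d.insert loc (d.getD loc 0 + 1) else d) PySem.Dict.empty := by
      apply PySem.List.foldl_congr_mem
      intro d loc _
      cases hc : PySem.Str.isIn "," loc <;>
        simp only [pvNoComma, hc, Bool.not_true, Bool.not_false, if_true, if_false] <;> simp
    rw [h1, PySem.List.foldl_if_eq_foldl_filter,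
      PySem.Dict.foldl_insert_getD_add_one_eq_counter]
  rw [hcnt]
  simp only [PySem.Dict.items_counter, List.foldl_map]
  have h2 : ∀ (res : List (String × List String)) k,
      k ∈ PySem.Set.ofList (locations.filter pvNoComma) →
      (fun res (pc : String × Int) =>
        if (locations.filter (fun t =>
            decide (PySem.Str.len t > PySem.Str.len pc.1) && PySem.Str.isIn pc.1 t)).isEmpty
        then res
        else res ++ [(pc.1, PySem.List.pyRepeat (locations.filter (fun t =>
            decide (PySem.Str.len t > PySem.Str.len pc.1) && PySem.Str.isIn pc.1 t)) pc.2)])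
        res (k, ((List.count k (locations.filter pvNoComma) : Nat) : Int))
      = (fun res k =>
          if !(pvMs locations k).isEmpty
          then res ++ [(k, PySem.List.pyRepeat (pvMs locations k)
              ((List.count k (locations.filter pvNoComma) : Nat) : Int))]
          else res) res k := by
    intro res k _
    have hfe : locations.filter (fun t =>
        decide (PySem.Str.len t > PySem.Str.len k) && PySem.Str.isIn k t) = pvMs locations k := by
      apply List.filter_congr
      intro t _
      simp [pvQ, Bool.and_comm]
    simp only [hfe]
    by_cases he : (pvMs locations k).isEmpty <;> simp [he]
  rw [PySem.List.foldl_congr_mem _ _ _ _ h2,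
    PySem.List.foldl_append_if (fun k => !(pvMs locations k).isEmpty)]
  simp [pvSpecItems]

-- ===== VERDICT (by name: the statement is the Claim_ definition above) =====
theorem analyze_location_hierarchy_spec : Claim_equal_analyze_location_hierarchy := by
  intro locations _
  unfold Spec_analyze_location_hierarchy
  rw [pvA_eq, pvB_eq]
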